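-- pv_equiv track=rewrite | github.com/sasho33/youtube-transcribtion-with-diaryzation-of-speakers | pipeline/find_prediction.py | _remove_duplicate_predictions
-- ===== SOURCE A (Python) =====
-- from typing import List, Dict, Any, Optional
--
-- def _remove_duplicate_predictions(predictions_array: List[Dict[str, Any]]) -> List[Dict[str, Any]]:
--     """
--     Remove duplicate predictions based on predictor and predicted_winner.
--     Keep the one with more detailed information.
--     """
--     seen = {}
--     unique_predictions = []
--
--     for pred in predictions_array:
--         key = f"{pred.get('predictor', '')}_{pred.get('predicted_winner', '')}"
--
--         if key not in seen:
--             seen[key] = pred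
--             unique_predictions.append(pred)
--         else:
--             # Keep the prediction with more detailed summary
--             current_summary_length = len(pred.get('prediction_summary', '') or '')
--             existing_summary_length = len(seen[key].get('prediction_summary', '') or '')
--
--             if current_summary_length > existing_summary_length:
--                 # Replace with more detailed version
--                 for i, existing_pred in enumerate(unique_predictions):
--                     if existing_pred == seen[key]:
--                         unique_predictions[i] = pred
--                         seen[key] = pred
--                         break
--
--     return unique_predictions
-- ===== SOURCE B (Python) =====
-- def _remove_duplicate_predictions(predictions_array):
--     groups = {}
--     for pred in predictions_array:
--         key = f"{pred.get('predictor', '')}_{pred.get('predicted_winner', '')}"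
--         groups[key] = groups.get(key, []) + [pred]
--     return [max(group, key=lambda p: len(p.get('prediction_summary', '') or ''))
--             for group in groups.values()]
-- ===== Notes on version B (the rewrite author's own statement) =====
-- stated objective: simpler
-- what changed: Replaced the interleaved scan with dict-guarded in-place replacement (inner search loop over the output list) by a two-pass version: group predictions by key in an insertion-ordered dict, then take per group the first prediction of maximal summary length (Python max), which reproduces A's earliest-at-max tie-break.
import Mathlib
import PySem

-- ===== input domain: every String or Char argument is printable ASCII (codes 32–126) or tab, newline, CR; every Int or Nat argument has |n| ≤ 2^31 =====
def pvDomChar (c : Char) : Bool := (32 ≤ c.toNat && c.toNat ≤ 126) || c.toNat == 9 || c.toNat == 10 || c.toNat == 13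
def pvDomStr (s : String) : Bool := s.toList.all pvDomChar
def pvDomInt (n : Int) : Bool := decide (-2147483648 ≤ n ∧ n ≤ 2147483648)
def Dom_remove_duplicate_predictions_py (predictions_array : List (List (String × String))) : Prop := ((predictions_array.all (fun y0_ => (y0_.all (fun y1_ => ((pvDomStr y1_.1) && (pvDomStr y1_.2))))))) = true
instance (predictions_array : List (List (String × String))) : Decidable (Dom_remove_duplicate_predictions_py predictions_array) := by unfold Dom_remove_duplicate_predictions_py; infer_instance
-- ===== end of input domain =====

-- B replaces A's single scan with in-place replacement (inner search loop) by a group-by-key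
-- pass followed by a per-group max; same return value, simpler decomposition ('simpler', not faster).

-- shared helpers: both Pythons evaluate exactly these expressions
-- pred.get(k, '')  (dict lookup with default)
def pvGet (p : List (String × String)) (k : String) : String :=
  (PySem.Dict.mk p).getD k ""

-- f"{pred.get('predictor','')}_{pred.get('predicted_winner','')}"
def pvKey (p : List (String × String)) : String :=
  pvGet p "predictor" ++ "_" ++ pvGet p "predicted_winner"

-- len(pred.get('prediction_summary','') or '')  ('s or ""' has the same length as s)
def pvSLen (p : List (String × String)) : Int :=
  PySem.Str.len (pvGet p "prediction_summary")

-- ===== PORT A =====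
-- inner 'for i, existing_pred in enumerate(unique_predictions): if existing_pred == seen[key]: … break'
-- (structural equality is exact here: unique_predictions holds one dict per key, so the first
-- Python-== match is the stored seen[key] itself)
def pvReplaceLoop (target repl : List (String × String)) :
    List (List (String × String)) → Option (List (List (String × String)))
  | [] => none
  | q :: rest =>
    if q = target then some (repl :: rest)
    else (pvReplaceLoop target repl rest).map (q :: ·)

-- one iteration of A's main 'for pred in predictions_array' loop, state = (seen, unique_predictions)
def pvAStep (st : PySem.Dict String (List (String × String)) × List (List (String × String)))
    (pred : List (String × String)) :
    PySem.Dict String (List (String × String)) × List (List (String × String)) :=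
  if st.1.contains (pvKey pred) = false then
    (st.1.insert (pvKey pred) pred, st.2 ++ [pred])
  else
    if pvSLen (st.1.getD (pvKey pred) []) < pvSLen pred then
      match pvReplaceLoop (st.1.getD (pvKey pred) []) pred st.2 with
      | some u => (st.1.insert (pvKey pred) pred, u)
      | none => st
    else st

def remove_duplicate_predictions_py (predictions_array : List (List (String × String))) :
    List (List (String × String)) :=
  (predictions_array.foldl pvAStep (PySem.Dict.empty, [])).2

-- ===== PORT B =====
-- groups[key] = groups.get(key, []) + [pred]
def pvBStep (g : PySem.Dict String (List (List (String × String))))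
    (pred : List (String × String)) : PySem.Dict String (List (List (String × String))) :=
  g.modify (pvKey pred) [] (· ++ [pred])

-- max(group, key=lambda p: len(p.get('prediction_summary','') or ''))  (groups are never empty)
def pvBest (group : List (List (String × String))) : List (String × String) :=
  (PySem.List.max? group pvSLen).getD []

def remove_duplicate_predictions_py_alt (predictions_array : List (List (String × String))) :
    List (List (String × String)) :=
  ((predictions_array.foldl pvBStep PySem.Dict.empty).values).map pvBest

-- ===== PRECONDITION & SPEC =====
def Spec_remove_duplicate_predictions_py (predictions_array : List (List (String × String))) (out : List (List (String × String))) : Prop := out = remove_duplicate_predictions_py_alt predictions_array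
instance (predictions_array : List (List (String × String))) (out : List (List (String × String))) : Decidable (Spec_remove_duplicate_predictions_py predictions_array out) := by unfold Spec_remove_duplicate_predictions_py; infer_instance

-- ===== CLAIM (what is proved, stated in full; the proofs are below) =====
def Claim_equal_remove_duplicate_predictions_py : Prop := ∀ (predictions_array : List (List (String × String))), Dom_remove_duplicate_predictions_py predictions_array → Spec_remove_duplicate_predictions_py predictions_array (remove_duplicate_predictions_py predictions_array)

-- ===== LEMMAS AND PROOFS =====

-- abstraction of A's state from B's grouping state (as an items list L)
def pvSeenOf (L : List (String × List (List (String × String)))) :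
    PySem.Dict String (List (String × String)) :=
  PySem.Dict.mk (L.map (fun e => (e.1, pvBest e.2)))

def pvUniqOf (L : List (String × List (List (String × String)))) :
    List (List (String × String)) :=
  L.map (fun e => pvBest e.2)

def pvWF (L : List (String × List (List (String × String)))) : Prop :=
  (L.map (·.1)).Nodup ∧ ∀ e ∈ L, e.2 ≠ [] ∧ ∀ p ∈ e.2, pvKey p = e.1

lemma pvBest_mem (l : List (List (String × String))) (h : l ≠ []) : pvBest l ∈ l := by
  unfold pvBest
  cases hm : PySem.List.max? l pvSLen with
  | none => exact absurd ((PySem.List.max?_eq_none_iff _ _).mp hm) h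
  | some m => simpa using PySem.List.max?_mem hm

lemma pvBest_append_singleton (l : List (List (String × String))) (p : List (String × String))
    (h : l ≠ []) :
    pvBest (l ++ [p]) = if pvSLen (pvBest l) < pvSLen p then p else pvBest l := by
  cases hm : PySem.List.max? l pvSLen with
  | none => exact absurd ((PySem.List.max?_eq_none_iff _ _).mp hm) h
  | some m =>
    unfold pvBest
    unfold PySem.List.max? at hm ⊢
    rw [List.foldl_append, hm]
    simp only [List.foldl_cons, List.foldl_nil]
    by_cases hc : pvSLen m < pvSLen p <;> simp [hc]

lemma pvReplaceLoop_eq (target repl : List (String × String))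
    (pre post : List (List (String × String))) (h : ∀ q ∈ pre, q ≠ target) :
    pvReplaceLoop target repl (pre ++ target :: post) = some (pre ++ repl :: post) := by
  induction pre with
  | nil => simp [pvReplaceLoop]
  | cons q qs ih =>
    have hq : q ≠ target := h q (by simp)
    simp only [List.cons_append, pvReplaceLoop, if_neg hq,
      ih (fun x hx => h x (List.mem_cons_of_mem _ hx))]
    rfl

lemma pvStep_comm (L : List (String × List (List (String × String))))
    (hwf : pvWF L) (pred : List (String × String)) :
    pvAStep (pvSeenOf L, pvUniqOf L) pred
      = (pvSeenOf (pvBStep (PySem.Dict.mk L) pred).items,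
         pvUniqOf (pvBStep (PySem.Dict.mk L) pred).items)
    ∧ pvWF (pvBStep (PySem.Dict.mk L) pred).items := by
  obtain ⟨hnd, hent⟩ := hwf
  have hkeysL : (PySem.Dict.mk L).keys = L.map (·.1) := rfl
  have hkeysS : (pvSeenOf L).keys = L.map (·.1) := by
    simp [pvSeenOf, PySem.Dict.keys]
  by_cases hmem : pvKey pred ∈ L.map (·.1)
  · -- key already grouped: L = pre ++ (k, l) :: post
    obtain ⟨e, heL, hek⟩ := List.mem_map.mp hmem
    obtain ⟨pre, post, hL⟩ := List.append_of_mem heL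
    obtain ⟨k0, l⟩ := e
    have hek' : k0 = pvKey pred := hek
    subst hek'
    subst hL
    have hnd2 : (pre.map (·.1) ++ pvKey pred :: post.map (·.1)).Nodup := by
      simpa using hnd
    have hndpre : pvKey pred ∉ pre.map (·.1) := fun hx =>
      (List.nodup_append.mp hnd2).2.2 _ hx _ (List.mem_cons_self ..) rfl
    have hndpost : pvKey pred ∉ post.map (·.1) :=
      (List.nodup_cons.mp (List.nodup_append.mp hnd2).2.1).1
    have hl := hent (pvKey pred, l) heL
    have hlne : l ≠ [] := hl.1
    have hlk : ∀ p ∈ l, pvKey p = pvKey pred := hl.2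
    have hbl : pvBest l ∈ l := pvBest_mem l hlne
    have hcont : (PySem.Dict.mk (pre ++ (pvKey pred, l) :: post)).contains (pvKey pred) = true := by
      rw [PySem.Dict.contains_eq_decide_mem_keys, hkeysL]
      simp
    have hcontS : (pvSeenOf (pre ++ (pvKey pred, l) :: post)).contains (pvKey pred) = true := by
      rw [PySem.Dict.contains_eq_decide_mem_keys, hkeysS]
      simp
    have hgetB : (PySem.Dict.mk (pre ++ (pvKey pred, l) :: post)).getD (pvKey pred) [] = l :=
      PySem.Dict.getD_of_mem_items _ (by simp) (by rw [hkeysL]; exact hnd) []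
    have hgetS : (pvSeenOf (pre ++ (pvKey pred, l) :: post)).getD (pvKey pred) [] = pvBest l := by
      refine PySem.Dict.getD_of_mem_items _ ?_ (by rw [hkeysS]; exact hnd) []
      simp [pvSeenOf]
    have hB : (pvBStep (PySem.Dict.mk (pre ++ (pvKey pred, l) :: post)) pred).items
        = pre ++ (pvKey pred, l ++ [pred]) :: post := by
      unfold pvBStep PySem.Dict.modify
      rw [hgetB, PySem.Dict.items_insert_of_contains _ _ hcont]
      show ((pre ++ (pvKey pred, l) :: post).map _) = _
      rw [List.map_append, List.map_cons]
      congr 1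
      · refine List.map_congr_left ?_ |>.trans (List.map_id _)
        intro e he
        have : e.1 ≠ pvKey pred := fun hx => hndpre (hx ▸ List.mem_map_of_mem he)
        simp [this]
      · congr 1
        · simp
        · refine List.map_congr_left ?_ |>.trans (List.map_id _)
          intro e he
          have : e.1 ≠ pvKey pred := fun hx => hndpost (hx ▸ List.mem_map_of_mem he)
          simp [this]
    have hWF' : pvWF (pre ++ (pvKey pred, l ++ [pred]) :: post) := by
      constructor
      · simpa using hnd
      · intro e he
        rcases List.mem_append.mp he with he | he
        · exact hent e (List.mem_append.mpr (Or.inl he))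
        · rcases List.mem_cons.mp he with rfl | he
          · refine ⟨by simp, ?_⟩
            intro p hp
            rcases List.mem_append.mp hp with hp | hp
            · exact hlk p hp
            · simp at hp; subst hp; rfl
          · exact hent e (by simp [he])
    rw [hB]
    refine ⟨?_, hWF'⟩
    -- A's step
    unfold pvAStep
    rw [hcontS, hgetS]
    simp only [Bool.true_eq_false, if_false]
    by_cases hlt : pvSLen (pvBest l) < pvSLen pred
    · have hbnew : pvBest (l ++ [pred]) = pred := by
        rw [pvBest_append_singleton l pred hlne, if_pos hlt]
      have hpreq : ∀ q ∈ pre.map (fun e => pvBest e.2), q ≠ pvBest l := by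
        intro q hq hq'
        obtain ⟨e, he, rfl⟩ := List.mem_map.mp hq
        have he2 := hent e (List.mem_append.mpr (Or.inl he))
        have h1 : pvKey (pvBest e.2) = e.1 := he2.2 _ (pvBest_mem e.2 he2.1)
        have h2 : pvKey (pvBest l) = pvKey pred := hlk _ hbl
        rw [hq', h2] at h1
        exact hndpre (h1 ▸ List.mem_map_of_mem he)
      have hrepl : pvReplaceLoop (pvBest l) pred (pvUniqOf (pre ++ (pvKey pred, l) :: post))
          = some ((pre.map (fun e => pvBest e.2)) ++ pred :: post.map (fun e => pvBest e.2)) := by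
        have : pvUniqOf (pre ++ (pvKey pred, l) :: post) = (pre.map (fun e => pvBest e.2)) ++ pvBest l :: post.map (fun e => pvBest e.2) := by
          simp [pvUniqOf]
        rw [this]
        exact pvReplaceLoop_eq _ _ _ _ hpreq
      rw [if_pos hlt, hrepl]
      show ((pvSeenOf _).insert (pvKey pred) pred, _) = _
      simp only [Prod.mk.injEq]
      refine ⟨?_, ?_⟩
      · -- seen dicts agree
        apply PySem.Dict.ext
        rw [PySem.Dict.items_insert_of_contains _ _ hcontS]
        show (((pre ++ (pvKey pred, l) :: post).map _).map _) = ((pre ++ (pvKey pred, l ++ [pred]) :: post).map _)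
        simp only [List.map_append, List.map_cons, List.map_map]
        refine congrArg₂ _ ?_ (congrArg₂ _ ?_ ?_)
        · refine List.map_congr_left ?_
          intro e he
          have : e.1 ≠ pvKey pred := fun hx => hndpre (hx ▸ List.mem_map_of_mem he)
          simp [Function.comp, this]
        · simp [hbnew]
        · refine List.map_congr_left ?_
          intro e he
          have : e.1 ≠ pvKey pred := fun hx => hndpost (hx ▸ List.mem_map_of_mem he)
          simp [Function.comp, this]
      · simp [pvUniqOf, hbnew]
    · have hbnew : pvBest (l ++ [pred]) = pvBest l := by
        rw [pvBest_append_singleton l pred hlne, if_neg hlt]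
      rw [if_neg hlt]
      simp only [Prod.mk.injEq]
      refine ⟨?_, ?_⟩
      · apply PySem.Dict.ext
        show ((pre ++ (pvKey pred, l) :: post).map _) = ((pre ++ (pvKey pred, l ++ [pred]) :: post).map _)
        simp [hbnew]
      · simp [pvUniqOf, hbnew]
  · -- fresh key
    have hcont : (PySem.Dict.mk L).contains (pvKey pred) = false := by
      rw [PySem.Dict.contains_eq_decide_mem_keys, hkeysL]
      simpa using hmem
    have hcontS : (pvSeenOf L).contains (pvKey pred) = false := by
      rw [PySem.Dict.contains_eq_decide_mem_keys, hkeysS]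
      simpa using hmem
    have hB : (pvBStep (PySem.Dict.mk L) pred).items = L ++ [(pvKey pred, [pred])] := by
      unfold pvBStep PySem.Dict.modify
      rw [PySem.Dict.getD_of_not_contains _ _ hcont,
        PySem.Dict.items_insert_of_not_contains _ _ hcont]
      rfl
    rw [hB]
    refine ⟨?_, ?_, ?_⟩
    · unfold pvAStep
      rw [hcontS, if_pos rfl]
      simp only [Prod.mk.injEq]
      refine ⟨?_, ?_⟩
      · apply PySem.Dict.ext
        rw [PySem.Dict.items_insert_of_not_contains _ _ hcontS]
        show (L.map _) ++ _ = ((L ++ [(pvKey pred, [pred])]).map _)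
        simp [pvBest, PySem.List.max?]
      · simp [pvUniqOf, pvBest, PySem.List.max?]
    · simpa using List.Nodup.append hnd (by simp) (by simpa [List.disjoint_singleton] using hmem)
    · intro e he
      rcases List.mem_append.mp he with he | he
      · exact hent e he
      · simp at he; subst he
        exact ⟨by simp, by simp⟩

lemma pvLoop_comm (arr : List (List (String × String))) :
    ∀ (L : List (String × List (List (String × String)))), pvWF L →
    arr.foldl pvAStep (pvSeenOf L, pvUniqOf L)
      = (pvSeenOf (arr.foldl pvBStep (PySem.Dict.mk L)).items,
         pvUniqOf (arr.foldl pvBStep (PySem.Dict.mk L)).items)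
    ∧ pvWF (arr.foldl pvBStep (PySem.Dict.mk L)).items := by
  induction arr with
  | nil => intro L h; exact ⟨rfl, h⟩
  | cons a t ih =>
    intro L h
    have hs := pvStep_comm L h a
    simp only [List.foldl_cons, hs.1]
    exact ih _ hs.2

-- ===== VERDICT (by name: the statement is the Claim_ definition above) =====
theorem remove_duplicate_predictions_py_spec : Claim_equal_remove_duplicate_predictions_py := by
  intro arr _
  show _ = _
  have h := (pvLoop_comm arr [] ⟨List.nodup_nil, by simp⟩).1
  unfold remove_duplicate_predictions_py remove_duplicate_predictions_py_alt
  have he : (PySem.Dict.empty : PySem.Dict String (List (String × String))) = pvSeenOf [] := rfl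
  have he2 : (PySem.Dict.empty : PySem.Dict String (List (List (String × String)))) = PySem.Dict.mk [] := rfl
  rw [he, he2]
  have : ([] : List (List (String × String))) = pvUniqOf [] := rfl
  rw [this, h]
  simp [pvUniqOf, PySem.Dict.values]
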